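-- pv_equiv track=rewrite | github.com/YashReddy1963/Varnan | transliteration/formatters.py | _break_into_syllables
-- ===== SOURCE A (Python) =====
-- def _break_into_syllables(word: str) -> str:
--     """
--     Basic syllable breaking for pronunciation guide.
--     """
--     # Simple heuristic: break at vowel-consonant boundaries
--     syllables = []
--     current_syllable = ""
--
--     for i, char in enumerate(word):
--         current_syllable += char
--
--         # Break after vowel if next char is consonant and not end of word
--         if (i < len(word) - 1 and
--             char.lower() in 'aeiou' and
--             word[i + 1].lower() not in 'aeiou'):
--             syllables.append(current_syllable)
--             current_syllable = ""
--
--     if current_syllable: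
--         syllables.append(current_syllable)
--
--     return '-'.join(syllables)
-- ===== SOURCE B (Python) =====
-- import re
--
-- def _break_into_syllables(word: str) -> str:
--     # One regex substitution: insert '-' after every vowel that is
--     # followed by a non-vowel (lookahead fails at end of string).
--     return re.sub(r'(?i)([aeiou])(?=[^aeiou])', r'\1-', word)
-- ===== Notes on version B (the rewrite author's own statement) =====
-- stated objective: idiomatic
-- what changed: Replaces the accumulator loop (syllable list plus current-syllable string, joined at the end) by a single regex substitution that inserts a hyphen after each vowel followed by a non-vowel.
import Mathlib
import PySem

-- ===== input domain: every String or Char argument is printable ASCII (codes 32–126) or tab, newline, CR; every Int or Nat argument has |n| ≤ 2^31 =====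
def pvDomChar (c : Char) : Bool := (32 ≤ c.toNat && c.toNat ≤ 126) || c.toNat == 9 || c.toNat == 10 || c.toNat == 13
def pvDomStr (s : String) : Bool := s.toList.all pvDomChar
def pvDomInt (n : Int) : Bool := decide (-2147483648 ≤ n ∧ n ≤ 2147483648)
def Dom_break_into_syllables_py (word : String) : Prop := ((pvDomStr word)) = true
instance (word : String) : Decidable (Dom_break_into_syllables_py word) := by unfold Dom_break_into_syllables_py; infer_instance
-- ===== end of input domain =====

-- B replaces A's accumulator loop (syllable list + current-syllable string, '-'.join at the end)
-- by a single substitution pass inserting '-' after each vowel followed by a non-vowel (idiomatic, same cost).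

-- char.lower() in 'aeiou' (ASCII lowering is exact on the stated printable-ASCII domain)
def pvVowel (c : Char) : Bool :=
  let l := if 'A' ≤ c ∧ c ≤ 'Z' then Char.ofNat (c.toNat + 32) else c
  l == 'a' || l == 'e' || l == 'i' || l == 'o' || l == 'u'

-- ===== PORT A =====
-- A's for-loop as structural recursion over the remaining characters, state = (syllables, current_syllable);
-- 'i < len(word) - 1' = the rest is nonempty, 'word[i + 1]' = the head of the rest.
def pvALoop (acc : List (List Char)) (cur : List Char) : List Char → List (List Char)
  | [] => if cur ≠ [] then acc ++ [cur] else acc      -- the post-loop 'if current_syllable'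
  | c :: rest =>
      match rest with
      | d :: _ =>
          if pvVowel c && !pvVowel d then pvALoop (acc ++ [cur ++ [c]]) [] rest
          else pvALoop acc (cur ++ [c]) rest
      | [] => pvALoop acc (cur ++ [c]) rest

-- '-'.join, ported by hand (exact)
def pvJoinDash : List (List Char) → List Char
  | [] => []
  | [s] => s
  | s :: rest => s ++ '-' :: pvJoinDash rest

def break_into_syllables_py (word : String) : String :=
  String.mk (pvJoinDash (pvALoop [] [] word.toList))

-- ===== PORT B =====
-- hand port of the single substitution re.sub(r'(?i)([aeiou])(?=[^aeiou])', r'\1-', word),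
-- exact for this pattern: copy each char, emitting '-' after a vowel whose successor is a non-vowel.
def pvBGo : List Char → List Char
  | [] => []
  | c :: rest =>
      c :: (if pvVowel c && (match rest.head? with | some d => !pvVowel d | none => false)
            then '-' :: pvBGo rest else pvBGo rest)

def break_into_syllables_py_alt (word : String) : String :=
  String.mk (pvBGo word.toList)

-- ===== PRECONDITION & SPEC =====
def Spec_break_into_syllables_py (word : String) (out : String) : Prop := out = break_into_syllables_py_alt word
instance (word : String) (out : String) : Decidable (Spec_break_into_syllables_py word out) := by unfold Spec_break_into_syllables_py; infer_instance

-- ===== CLAIM (what is proved, stated in full; the proofs are below) =====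
def Claim_equal_break_into_syllables_py : Prop := ∀ (word : String), Dom_break_into_syllables_py word → Spec_break_into_syllables_py word (break_into_syllables_py word)

-- ===== LEMMAS AND PROOFS =====

-- one-step equations (so rewrites never unfold the recursive call)
theorem pvALoop_nil (acc : List (List Char)) (cur : List Char) :
    pvALoop acc cur [] = if cur ≠ [] then acc ++ [cur] else acc := rfl

theorem pvALoop_single (acc : List (List Char)) (cur : List Char) (c : Char) :
    pvALoop acc cur [c] = pvALoop acc (cur ++ [c]) [] := rfl

theorem pvALoop_cons2 (acc : List (List Char)) (cur : List Char) (c d : Char) (rest : List Char) :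
    pvALoop acc cur (c :: d :: rest) =
      if pvVowel c && !pvVowel d then pvALoop (acc ++ [cur ++ [c]]) [] (d :: rest)
      else pvALoop acc (cur ++ [c]) (d :: rest) := rfl

theorem pvBGo_cons2 (c d : Char) (rest : List Char) :
    pvBGo (c :: d :: rest) =
      c :: (if pvVowel c && !pvVowel d then '-' :: pvBGo (d :: rest) else pvBGo (d :: rest)) := rfl

-- the accumulated syllable list is only ever appended to
theorem pvALoop_acc (l : List Char) (acc : List (List Char)) (cur : List Char) :
    pvALoop acc cur l = acc ++ pvALoop [] cur l := by
  induction l generalizing acc cur with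
  | nil => rw [pvALoop_nil, pvALoop_nil]; split <;> simp
  | cons c rest ih =>
      cases rest with
      | nil => rw [pvALoop_single, pvALoop_single, pvALoop_nil, pvALoop_nil]; split <;> simp
      | cons d rest' =>
          rw [pvALoop_cons2, pvALoop_cons2]
          split
          · rw [ih (acc ++ [cur ++ [c]]) [], ih ([] ++ [cur ++ [c]]) []]; simp
          · rw [ih acc (cur ++ [c]), ih [] (cur ++ [c])]

-- on a nonempty remainder the loop produces at least one syllable
theorem pvALoop_ne_nil (cur : List Char) (c : Char) (l : List Char) :
    pvALoop [] cur (c :: l) ≠ [] := by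
  induction l generalizing cur c with
  | nil => rw [pvALoop_single, pvALoop_nil]; simp
  | cons d rest ih =>
      rw [pvALoop_cons2]
      split
      · rw [pvALoop_acc]; simp
      · exact ih _ d

theorem pvJoinDash_cons (s : List Char) (l : List (List Char)) (h : l ≠ []) :
    pvJoinDash (s :: l) = s ++ '-' :: pvJoinDash l := by
  cases l with
  | nil => exact absurd rfl h
  | cons t ts => rfl

-- main invariant: joining the loop's syllables prepends the pending current syllable to B's output
theorem pvALoop_join (l : List Char) (cur : List Char) :
    pvJoinDash (pvALoop [] cur l) = cur ++ pvBGo l := by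
  induction l generalizing cur with
  | nil =>
      rw [pvALoop_nil]
      by_cases h : cur = [] <;> simp [h, pvJoinDash, pvBGo]
  | cons c rest ih =>
      cases rest with
      | nil =>
          rw [pvALoop_single, pvALoop_nil]
          simp [pvJoinDash, pvBGo]
      | cons d rest' =>
          rw [pvALoop_cons2, pvBGo_cons2]
          by_cases h : (pvVowel c && !pvVowel d) = true
          · rw [if_pos h, if_pos h, pvALoop_acc,
                List.nil_append, List.singleton_append,
                pvJoinDash_cons _ _ (pvALoop_ne_nil [] d rest')]
            have h2 := ih ([] : List Char)
            simp only [List.nil_append] at h2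
            rw [h2]; simp
          · rw [if_neg h, if_neg h, ih (cur ++ [c])]; simp

-- ===== VERDICT (by name: the statement is the Claim_ definition above) =====
theorem break_into_syllables_py_spec : Claim_equal_break_into_syllables_py := by
  intro word _
  unfold Spec_break_into_syllables_py break_into_syllables_py break_into_syllables_py_alt
  rw [pvALoop_join]
  simp
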